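-- pv_equiv track=rewrite | github.com/Alina-Kumorek/pp1 | 13-Test3/p1.py | f
-- ===== SOURCE A (Python) =====
-- def f(n):
--     if n > 0:
--         c = 0
--         s = ""
--         for i in range(n):
--             if c == 5:
--                 c = 1
--                 s += "-/"
--             else:
--                 c += 1
--                 s += "/"
--         return s
--     else:
--         return ""
-- ===== SOURCE B (Python) =====
-- def f(n):
--     if n <= 0:
--         return ""
--     return "-".join("/" * min(5, n - i) for i in range(0, n, 5))
-- ===== Notes on version B (the rewrite author's own statement) =====
-- stated objective: simpler
-- what changed: Replaces the char-by-char loop with a mutable dash counter by emitting whole slash runs over range(0,n,5) and joining them with '-'; no counter state at all.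
import Mathlib
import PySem

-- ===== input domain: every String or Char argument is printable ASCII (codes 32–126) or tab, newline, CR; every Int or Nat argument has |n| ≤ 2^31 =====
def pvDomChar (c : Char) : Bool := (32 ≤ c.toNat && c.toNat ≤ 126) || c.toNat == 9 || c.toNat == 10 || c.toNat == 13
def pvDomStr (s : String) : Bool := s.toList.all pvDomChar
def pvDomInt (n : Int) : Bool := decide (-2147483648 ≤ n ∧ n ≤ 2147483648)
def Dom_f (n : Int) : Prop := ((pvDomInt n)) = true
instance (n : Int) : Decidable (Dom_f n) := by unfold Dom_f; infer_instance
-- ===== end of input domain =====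

-- B replaces A's char-by-char loop (dash-counter state) by joining 5-slash runs over range(0,n,5); simpler, same cost.

-- ===== PORT A =====
-- A's loop body: state (c, s); dash branch when c == 5.
def fStep (st : Int × List Char) (_i : Int) : Int × List Char :=
  if st.1 == 5 then (1, st.2 ++ ['-', '/']) else (st.1 + 1, st.2 ++ ['/'])

def f (n : Int) : String :=
  if n > 0 then String.ofList (((PySem.List.pyRange 0 n 1).foldl fStep (0, [])).2)
  else ""

-- ===== PORT B =====
-- "/" * min(5, n - i)
def chunkOf (n i : Int) : List Char := List.replicate (min 5 (n - i)).toNat '/'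

def f_alt (n : Int) : String :=
  if n ≤ 0 then ""
  else String.ofList (PySem.Chars.join ['-'] ((PySem.List.pyRange 0 n 5).map (chunkOf n)))

-- ===== PRECONDITION & SPEC =====
def Spec_f (n : Int) (out : String) : Prop := out = f_alt n
instance (n : Int) (out : String) : Decidable (Spec_f n out) := by unfold Spec_f; infer_instance

-- ===== CLAIM (what is proved, stated in full; the proofs are below) =====
def Claim_equal_f : Prop := ∀ (n : Int), Dom_f n → Spec_f n (f n)

-- ===== LEMMAS AND PROOFS =====

-- the common value: after m characters, dash inserted before every 5th slash except the first
def g : Nat → List Char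
  | 0 => []
  | m + 1 => g m ++ (if m % 5 = 0 ∧ m ≠ 0 then ['-', '/'] else ['/'])

-- A's counter value after m iterations
def cOf (m : Nat) : Int := if m = 0 then 0 else (((m - 1) % 5 : Nat) : Int) + 1

theorem lemA (m : Nat) :
    (PySem.List.pyRange 0 (m : Int) 1).foldl fStep (0, []) = (cOf m, g m) := by
  induction m with
  | zero => simp [PySem.List.pyRange_one_eq_nil, cOf, g]
  | succ m ih =>
    have : ((m + 1 : Nat) : Int) = (m : Int) + 1 := by push_cast; ring
    rw [this, PySem.List.pyRange_one_succ_right (by positivity), List.foldl_append, ih]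
    simp only [List.foldl_cons, List.foldl_nil, fStep]
    by_cases h0 : m = 0
    · subst h0; simp [cOf, g]
    · by_cases h5 : (m - 1) % 5 = 4
      · have hc : cOf m == 5 := by simp [cOf, h0, h5]
        have hm5 : m % 5 = 0 := by omega
        simp [g, cOf, hm5, h0]
        omega
      · have hc : ¬ (cOf m == 5) := by
          simp [cOf, h0]; omega
        have hm5 : ¬ (m % 5 = 0) := by omega
        simp [g, cOf, hm5, h0]
        rw [if_neg (show ¬(((m - 1 : Nat) : Int) % 5 + 1 = 5) by omega)]
        simp only [Prod.mk.injEq]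
        exact ⟨by omega, trivial⟩

theorem g_step (m : Nat) (h : 6 ≤ m) :
    g m = ['/', '/', '/', '/', '/', '-'] ++ g (m - 5) := by
  induction m with
  | zero => omega
  | succ m ih =>
    by_cases h6 : m = 5
    · subst h6; decide
    · have hm : 6 ≤ m := by omega
      have heq : m + 1 - 5 = (m - 5) + 1 := by omega
      rw [show g (m + 1) = g m ++ (if m % 5 = 0 ∧ m ≠ 0 then ['-', '/'] else ['/']) from rfl,
          ih hm, heq,
          show g ((m - 5) + 1) = g (m - 5) ++ (if (m - 5) % 5 = 0 ∧ (m - 5) ≠ 0 then ['-', '/'] else ['/']) from rfl]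
      have : (m % 5 = 0 ∧ m ≠ 0) ↔ ((m - 5) % 5 = 0 ∧ (m - 5) ≠ 0) := by omega
      simp only [List.append_assoc]
      congr 1
      split_ifs with ha hb hb <;> first | rfl | (exfalso; omega)

theorem range5_shift (m : Nat) (h : 6 ≤ m) :
    PySem.List.pyRange 0 (m : Int) 5 =
      0 :: (PySem.List.pyRange 0 ((m : Int) - 5) 5).map (fun i => i + 5) := by
  rw [PySem.List.pyRange_of_pos _ _ (by norm_num), PySem.List.pyRange_of_pos _ _ (by norm_num)]
  have h1 : (0 : Int) < (m : Int) := by exact_mod_cast Nat.lt_of_lt_of_le (by norm_num) h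
  have h2 : (0 : Int) < (m : Int) - 5 := by
    have : (6 : Int) ≤ (m : Int) := by exact_mod_cast h
    omega
  rw [if_pos h1, if_pos h2]
  have hk : (((m : Int) - 0 + 5 - 1) / 5).toNat = ((((m : Int) - 5) - 0 + 5 - 1) / 5).toNat + 1 := by
    omega
  rw [hk, List.range_succ_eq_map, List.map_cons, List.map_map, List.map_map]
  refine List.cons_eq_cons.mpr ⟨by norm_num, List.map_congr_left ?_⟩
  intro k _
  simp only [Function.comp]
  push_cast
  ring

theorem lemB (m : Nat) (h1 : 1 ≤ m) :
    PySem.Chars.join ['-'] ((PySem.List.pyRange 0 (m : Int) 5).map (chunkOf (m : Int))) = g m := by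
  induction m using Nat.strong_induction_on with
  | _ m ih =>
    by_cases hs : m ≤ 5
    · interval_cases m <;> decide
    · have h6 : 6 ≤ m := by omega
      rw [range5_shift m h6]
      have hcast : ((m : Int) - 5) = ((m - 5 : Nat) : Int) := by omega
      have hchunk : (PySem.List.pyRange 0 ((m : Int) - 5) 5).map (chunkOf (m : Int) ∘ (fun i => i + 5))
          = (PySem.List.pyRange 0 (((m - 5 : Nat) : Nat) : Int) 5).map (chunkOf ((m - 5 : Nat) : Int)) := by
        rw [← hcast]
        apply List.map_congr_left
        intro i _
        simp only [Function.comp, chunkOf]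
        congr 2
        omega
      rw [List.map_cons, List.map_map, hchunk]
      have hrest : 1 ≤ m - 5 := by omega
      have ihr := ih (m - 5) (by omega) hrest
      -- the tail list is nonempty
      have hne : (PySem.List.pyRange 0 (((m - 5 : Nat)) : Int) 5).map (chunkOf ((m - 5 : Nat) : Int)) ≠ [] := by
        rw [PySem.List.pyRange_of_pos _ _ (by norm_num : (0:Int) < 5)]
        have : (0 : Int) < ((m - 5 : Nat) : Int) := by exact_mod_cast hrest
        rw [if_pos this]
        intro hcon
        simp at hcon
        omega
      obtain ⟨b, rest, hbr⟩ := List.exists_cons_of_ne_nil hne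
      rw [hbr] at ihr ⊢
      rw [PySem.Chars.join_cons_cons]
      have hc0 : chunkOf (m : Int) 0 = ['/', '/', '/', '/', '/'] := by
        simp only [chunkOf]
        have : min (5 : Int) ((m : Int) - 0) = 5 := by omega
        rw [this]; rfl
      rw [hc0, ihr, g_step m h6]
      rfl

-- ===== VERDICT (by name: the statement is the Claim_ definition above) =====
theorem f_spec : Claim_equal_f := by
  intro n _
  unfold Spec_f f f_alt
  by_cases h : n > 0
  · have hn : ¬ n ≤ 0 := by omega
    rw [if_pos h, if_neg hn]
    have hm : n = ((n.toNat : Nat) : Int) := by omega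
    rw [hm, lemA, lemB n.toNat (by omega)]
  · rw [if_neg h, if_pos (by omega : n ≤ 0)]
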